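-- pv_equiv track=rewrite | github.com/incava/baek | src/main/python/1436.py | sixCheck
-- ===== SOURCE A (Python) =====
-- def sixCheck(M): # 6이 연속 3번인지 확인하는 함수
--     cnt = 0 # 연속을 세는 변수
--     while(M):
--         if M % 10 == 6: # 일의자리숫자가 6이면?
--             cnt = cnt + 1 #연속 변수 +1
--         else:    #아니면? 다시 0으로 초기화
--             cnt = 0
--         if cnt == 3: #연속 3번이라면 return
--             return True
--         M = M // 10
--     return False #끝났는데도 없으면 false return
-- ===== SOURCE B (Python) =====
-- def sixCheck(M):
--     return '666' in str(M)
-- ===== Notes on version B (the rewrite author's own statement) =====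
-- stated objective: idiomatic
-- what changed: Replaces the arithmetic least-significant-digit loop with consecutive-six counter by a substring test '666' in str(M) over the decimal representation.
import Mathlib
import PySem

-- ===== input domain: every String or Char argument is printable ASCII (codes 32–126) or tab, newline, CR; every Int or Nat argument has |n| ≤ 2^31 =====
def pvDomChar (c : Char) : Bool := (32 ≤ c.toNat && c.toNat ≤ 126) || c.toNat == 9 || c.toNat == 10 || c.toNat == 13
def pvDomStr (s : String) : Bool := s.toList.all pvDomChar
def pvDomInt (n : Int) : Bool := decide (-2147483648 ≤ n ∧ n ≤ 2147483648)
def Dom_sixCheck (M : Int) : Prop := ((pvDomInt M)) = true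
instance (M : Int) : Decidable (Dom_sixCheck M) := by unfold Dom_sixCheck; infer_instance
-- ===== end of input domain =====

-- B replaces A's arithmetic digit loop (consecutive-6 counter) by the idiomatic substring test '666' in str(M).

-- ===== PORT A =====
-- while(M): the 'if 0 < m' guard is Python's loop test made total: the loop exits at m = 0,
-- and on m < 0 Python never terminates (those inputs are outside Pre_).
def sixCheckLoop (m : Int) (cnt : Int) : Bool :=
  if h : 0 < m then
    let cnt' := if PySem.Int.mod m 10 = 6 then cnt + 1 else 0
    if cnt' = 3 then true
    else sixCheckLoop (PySem.Int.floordiv m 10) cnt'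
  else false
termination_by m.toNat
decreasing_by
  have h1 : PySem.Int.floordiv m 10 < m := (PySem.Int.floordiv_lt_iff_lt_mul (by norm_num)).mpr (by omega)
  omega

def sixCheck (M : Int) : Bool := sixCheckLoop M 0

-- ===== PORT B =====
def sixCheck_alt (M : Int) : Bool := PySem.Str.isIn "666" (PySem.Int.toStr M)

-- ===== PRECONDITION & SPEC =====
-- Pre_ excludes negative M: there A's loop never terminates (M // 10 stalls at -1), so A returns exactly on M ≥ 0.
def Pre_sixCheck (M : Int) : Prop := 0 ≤ M
instance (M : Int) : Decidable (Pre_sixCheck M) := by unfold Pre_sixCheck; infer_instance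
def pvWitness_sixCheck : Int := (666)

def Spec_sixCheck (M : Int) (out : Bool) : Prop := out = sixCheck_alt M
instance (M : Int) (out : Bool) : Decidable (Spec_sixCheck M out) := by unfold Spec_sixCheck; infer_instance

-- ===== CLAIM (what is proved, stated in full; the proofs are below) =====
def Claim_equal_sixCheck : Prop := ∀ (M : Int), Dom_sixCheck M → Pre_sixCheck M → Spec_sixCheck M (sixCheck M)

-- ===== LEMMAS AND PROOFS =====

-- A's loop, rephrased on the (least-significant-first) digit list.
def pvScan : List Nat → Int → Bool
  | [], _ => false
  | d :: ds, c =>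
      let c' : Int := if d = 6 then c + 1 else 0
      if c' = 3 then true else pvScan ds c'

theorem pvLoop_eq_scan (n : Nat) : ∀ (c : Int), sixCheckLoop (n : Int) c = pvScan (Nat.digits 10 n) c := by
  induction n using Nat.strong_induction_on with
  | _ n ih =>
    intro c
    by_cases hn : 0 < n
    · have hmod : PySem.Int.mod (n : Int) 10 = ((n % 10 : Nat) : Int) := by
        exact_mod_cast PySem.Int.mod_natCast n 10
      have hdiv : PySem.Int.floordiv (n : Int) 10 = ((n / 10 : Nat) : Int) := by
        exact_mod_cast PySem.Int.floordiv_natCast n 10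
      rw [sixCheckLoop, dif_pos (by exact_mod_cast hn), Nat.digits_def' (by norm_num) hn, pvScan]
      simp only [hmod, hdiv]
      by_cases h6 : n % 10 = 6
      · have h6' : ((n % 10 : Nat) : Int) = 6 := by exact_mod_cast h6
        rw [if_pos h6', if_pos h6]
        by_cases h3 : c + 1 = 3
        · rw [if_pos h3, if_pos h3]
        · rw [if_neg h3, if_neg h3]
          exact ih (n / 10) (Nat.div_lt_self hn (by norm_num)) (c + 1)
      · have h6' : ¬ (((n % 10 : Nat) : Int) = 6) := by exact_mod_cast h6
        simp only [if_neg h6, if_neg h6']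
        norm_num
        exact ih (n / 10) (Nat.div_lt_self hn (by norm_num)) 0
    · have hz : n = 0 := by omega
      subst hz
      rw [sixCheckLoop]
      simp [pvScan]

theorem pvScan_iff (ds : List Nat) : ∀ (c : Int), 0 ≤ c → c < 3 →
    (pvScan ds c = true ↔ (List.replicate (3 - c).toNat 6 <+: ds) ∨ [6, 6, 6] <:+: ds) := by
  induction ds with
  | nil =>
    intro c h0 h3
    simp only [pvScan, Bool.false_eq_true, false_iff]
    rintro (hp | hi)
    · have := List.prefix_nil.mp hp
      rw [List.replicate_eq_nil_iff] at this
      omega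
    · exact absurd (List.infix_nil.mp hi) (by simp)
  | cons d ds ih =>
    intro c h0 h3
    by_cases h6 : d = 6
    · subst h6
      by_cases h2 : c = 2
      · subst h2
        simp only [pvScan, reduceIte]
        rw [if_pos (show (2:Int) + 1 = 3 by norm_num)]
        simp only [true_iff]
        refine Or.inl ?_
        have hone : List.replicate ((3:Int) - 2).toNat (6:Nat) = [6] := by decide
        rw [hone]
        exact List.cons_prefix_cons.mpr ⟨rfl, List.nil_prefix⟩
      · have hc' : c + 1 < 3 := by omega
        have hrep : List.replicate (3 - c).toNat (6:Nat) = 6 :: List.replicate (3 - (c + 1)).toNat 6 := by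
          have h' : (3 - c).toNat = (3 - (c + 1)).toNat + 1 := by omega
          rw [h', List.replicate_succ]
        rw [pvScan]
        simp only [reduceIte, if_neg (show ¬ (c + 1 = 3) by omega)]
        rw [ih (c + 1) (by omega) hc', hrep]
        constructor
        · rintro (hp | hi)
          · exact Or.inl (List.cons_prefix_cons.mpr ⟨rfl, hp⟩)
          · exact Or.inr (List.infix_cons hi)
        · rintro (hp | hi)
          · exact Or.inl (List.cons_prefix_cons.mp hp).2
          · rcases List.infix_cons_iff.mp hi with hp | hi'
            · left
              have hp' : [6, 6] <+: ds := (List.cons_prefix_cons.mp hp).2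
              have hsub : List.replicate (3 - (c + 1)).toNat (6:Nat) <+: [6, 6] := by
                have hle : (3 - (c + 1)).toNat ≤ 2 := by omega
                interval_cases h : (3 - (c + 1)).toNat <;> decide
              exact hsub.trans hp'
            · exact Or.inr hi'
    · rw [pvScan]
      simp only [if_neg h6]
      rw [if_neg (show ¬ ((0:Int) = 3) by norm_num)]
      rw [ih 0 le_rfl (by norm_num)]
      have hrep0 : List.replicate ((3:Int) - 0).toNat (6:Nat) = [6, 6, 6] := by decide
      rw [hrep0]
      constructor
      · rintro (hp | hi)
        · exact Or.inr (List.infix_cons hp.isInfix)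
        · exact Or.inr (List.infix_cons hi)
      · rintro (hp | hi)
        · exfalso
          have h' : (3 - c).toNat = ((3 - c).toNat - 1) + 1 := by omega
          rw [h', List.replicate_succ] at hp
          exact h6 (List.cons_prefix_cons.mp hp).1.symm
        · rcases List.infix_cons_iff.mp hi with hp | hi'
          · exact absurd (List.cons_prefix_cons.mp hp).1.symm h6
          · exact Or.inr hi'

-- fuel-indexed characterisation of Nat.toDigitsCore at base 10
theorem pvToDigitsCore_eq : ∀ (f n : Nat) (acc : List Char), 0 < n → n ≤ f →
    Nat.toDigitsCore 10 (f + 1) n acc = ((Nat.digits 10 n).map Nat.digitChar).reverse ++ acc := by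
  intro f
  induction f with
  | zero => intro n acc h1 h2; omega
  | succ f ih =>
    intro n acc h1 h2
    rw [Nat.toDigitsCore]
    rw [Nat.digits_def' (by norm_num) h1]
    by_cases hz : n / 10 = 0
    · simp [hz]
    · have h1' : 0 < n / 10 := Nat.pos_of_ne_zero hz
      have h2' : n / 10 ≤ f := by
        have := Nat.div_lt_self h1 (show 1 < 10 by norm_num)
        omega
      simp only [if_neg hz]
      rw [ih (n / 10) _ h1' h2', Nat.digits_def' (by norm_num) h1']
      simp

theorem pvToDigits_eq (n : Nat) (hn : 0 < n) :
    Nat.toDigits 10 n = ((Nat.digits 10 n).map Nat.digitChar).reverse := by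
  simpa [Nat.toDigits] using pvToDigitsCore_eq n n [] hn le_rfl

theorem pvDigitChar_six : ∀ a < 10, Nat.digitChar a = '6' → a = 6 := by decide

theorem pvInfix_map_iff (ds : List Nat) (h : ∀ d ∈ ds, d < 10) :
    (['6', '6', '6'] <:+: ds.map Nat.digitChar) ↔ [6, 6, 6] <:+: ds := by
  constructor
  · rintro ⟨s, t, hst⟩
    rcases List.map_eq_append_iff.mp hst.symm with ⟨l₁, l₂, hds, hl₁, hl₂⟩
    rcases List.map_eq_append_iff.mp hl₁ with ⟨m₁, m₂, hl₁', hm₁, hm₂⟩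
    rcases m₂ with _ | ⟨a, m₂⟩
    · simp at hm₂
    rcases m₂ with _ | ⟨b, m₂⟩
    · simp at hm₂
    rcases m₂ with _ | ⟨c, m₂⟩
    · simp at hm₂
    rcases m₂ with _ | ⟨d', m₂⟩
    case cons.cons.cons.cons => simp at hm₂
    · simp only [List.map_cons, List.map_nil, List.cons.injEq, and_true] at hm₂
      have hmem : ∀ x ∈ ([a, b, c] : List Nat), x ∈ ds := by
        intro x hx; rw [hds, hl₁']; simp only [List.append_assoc, List.mem_append]
        exact Or.inr (Or.inl hx)
      have ha6 : a = 6 := pvDigitChar_six a (h a (hmem a (by simp))) hm₂.1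
      have hb6 : b = 6 := pvDigitChar_six b (h b (hmem b (by simp))) hm₂.2.1
      have hc6 : c = 6 := pvDigitChar_six c (h c (hmem c (by simp))) hm₂.2.2
      refine ⟨m₁, l₂, ?_⟩
      rw [hds, hl₁', ha6, hb6, hc6]
  · rintro ⟨s, t, hst⟩
    refine ⟨s.map Nat.digitChar, t.map Nat.digitChar, ?_⟩
    have hd6 : Nat.digitChar 6 = '6' := by decide
    rw [← hst]
    simp [hd6]

-- ===== VERDICT (by name: the statement is the Claim_ definition above) =====
theorem sixCheck_spec : Claim_equal_sixCheck := by
  intro M _ hpre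
  unfold Spec_sixCheck sixCheck sixCheck_alt
  have hM : 0 ≤ M := hpre
  obtain ⟨n, rfl⟩ : ∃ n : Nat, M = (n : Int) := ⟨M.toNat, by omega⟩
  rw [pvLoop_eq_scan n 0]
  by_cases hn : 0 < n
  · have htc : PySem.Int.toChars (n : Int) = Nat.toDigits 10 n := by
      rw [PySem.Int.toChars, if_neg (not_lt.mpr (Int.natCast_nonneg n))]
      norm_num
    rw [Bool.eq_iff_iff, PySem.Str.isIn_iff_infix, PySem.Int.toList_toStr, htc,
        pvToDigits_eq n hn, pvScan_iff (Nat.digits 10 n) 0 le_rfl (by norm_num)]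
    have hrep0 : List.replicate ((3:Int) - 0).toNat (6:Nat) = [6, 6, 6] := by decide
    rw [hrep0]
    have h666 : (("666" : String).toList) = ['6', '6', '6'] := by decide
    rw [h666]
    have hrev : (['6', '6', '6'] <:+: ((Nat.digits 10 n).map Nat.digitChar).reverse) ↔
        (['6', '6', '6'] <:+: (Nat.digits 10 n).map Nat.digitChar) := by
      conv_lhs => rw [show (['6','6','6'] : List Char) = (['6','6','6'] : List Char).reverse from rfl]
      exact List.reverse_infix
    rw [hrev, pvInfix_map_iff _ (fun d hd => Nat.digits_lt_base (by norm_num) hd)]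
    constructor
    · rintro (hp | hi)
      · exact hp.isInfix
      · exact hi
    · exact Or.inr
  · have hz : n = 0 := by omega
    subst hz
    decide
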